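-- pv_equiv track=rewrite | github.com/haeunning/programmers | 프로그래머스/lv1/42840. 모의고사/모의고사.py | solution
-- ===== SOURCE A (Python) =====
-- def solution(answers):
--     a = [1,2,3,4,5]
--     b = [2,1,2,3,2,4,2,5]
--     c = [3,3,1,1,2,2,4,4,5,5]
--
--     aa=0
--     bb=0
--     cc=0
--     best = []
--     for i in range(len(answers)):
--         if answers[i] == a[i%5]:
--             aa+=1
--         if answers[i] == b[i%8]:
--             bb+=1
--         if answers[i] == c[i%10]:
--             cc+=1
--     if aa == max(aa,bb,cc):
--         best.append(1)
--     if bb == max(aa,bb,cc):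
--         best.append(2)
--     if cc == max(aa,bb,cc):
--         best.append(3)
--     return best
-- ===== SOURCE B (Python) =====
-- def solution(answers):
--     patterns = [[1, 2, 3, 4, 5],
--                 [2, 1, 2, 3, 2, 4, 2, 5],
--                 [3, 3, 1, 1, 2, 2, 4, 4, 5, 5]]
--     # All three patterns repeat with period dividing 40 (= lcm(5, 8, 10)), so a
--     # position contributes identically for every i in the same class mod 40.
--     # Build one histogram keyed by (i % 40, answer) in a single pass; each score
--     # is then read off with 40 lookups, with no per-pattern scan over answers.
--     tally = {}
--     for i, ans in enumerate(answers):
--         key = (i % 40, ans)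
--         tally[key] = tally.get(key, 0) + 1
--     scores = [sum(tally.get((r, p[r % len(p)]), 0) for r in range(40))
--               for p in patterns]
--     m = max(scores)
--     return [k + 1 for k, s in enumerate(scores) if s == m]
-- ===== Notes on version B (the rewrite author's own statement) =====
-- stated objective: alternative
-- what changed: A's single interleaved index pass with three hardcoded counters is replaced by a histogram dict keyed by (position mod 40, answer) built in one pass (40 = lcm of the three pattern periods); each pattern's score is then read off with 40 dictionary lookups instead of being accumulated per position, then max over the score list and a comprehension.
import Mathlib
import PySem

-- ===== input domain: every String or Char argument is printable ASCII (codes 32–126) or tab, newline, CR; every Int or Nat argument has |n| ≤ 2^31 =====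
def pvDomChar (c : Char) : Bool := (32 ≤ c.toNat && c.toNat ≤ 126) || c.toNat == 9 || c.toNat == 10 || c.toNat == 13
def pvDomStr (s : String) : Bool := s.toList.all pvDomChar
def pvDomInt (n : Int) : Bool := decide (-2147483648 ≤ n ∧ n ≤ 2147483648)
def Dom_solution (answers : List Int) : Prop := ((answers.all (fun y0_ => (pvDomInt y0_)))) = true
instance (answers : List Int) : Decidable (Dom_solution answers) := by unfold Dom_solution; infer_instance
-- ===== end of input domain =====

-- B replaces A's per-index scan with three counters by a histogram keyed by
-- (i % 40, answer) built in one pass (40 = lcm of the pattern periods), from which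
-- each pattern's score is read off with 40 dictionary lookups (objective: alternative).

-- ===== PORT A =====
-- one pass over the indices, three counters updated per step; Python's max(aa,bb,cc)
-- on ints has the value max aa (max bb cc)
def solution (answers : List Int) : List Int :=
  let a : List Int := [1, 2, 3, 4, 5]
  let b : List Int := [2, 1, 2, 3, 2, 4, 2, 5]
  let c : List Int := [3, 3, 1, 1, 2, 2, 4, 4, 5, 5]
  let st : Int × Int × Int :=
    (PySem.List.pyRange 0 answers.length).foldl
      (fun (s : Int × Int × Int) i =>
        ( (if PySem.List.pyGetD answers i 0 = PySem.List.pyGetD a (PySem.Int.mod i 5) 0 then s.1 + 1 else s.1),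
          (if PySem.List.pyGetD answers i 0 = PySem.List.pyGetD b (PySem.Int.mod i 8) 0 then s.2.1 + 1 else s.2.1),
          (if PySem.List.pyGetD answers i 0 = PySem.List.pyGetD c (PySem.Int.mod i 10) 0 then s.2.2 + 1 else s.2.2) ))
      (0, 0, 0)
  let m : Int := max st.1 (max st.2.1 st.2.2)
  let best : List Int := []
  let best := if st.1 = m then best ++ [1] else best
  let best := if st.2.1 = m then best ++ [2] else best
  let best := if st.2.2 = m then best ++ [3] else best
  best

-- ===== PORT B =====
-- one pass building tally = {(i % 40, answer): multiplicity}; each score is then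
-- sum(tally.get((r, p[r % len p]), 0) for r in range(40)); then max and a comprehension
def solution_alt (answers : List Int) : List Int :=
  let patterns : List (List Int) :=
    [[1, 2, 3, 4, 5], [2, 1, 2, 3, 2, 4, 2, 5], [3, 3, 1, 1, 2, 2, 4, 4, 5, 5]]
  let tally : PySem.Dict (Int × Int) Int :=
    (PySem.List.enumerate answers).foldl
      (fun d ia =>
        let key : Int × Int := (PySem.Int.mod ia.1 40, ia.2)
        d.insert key (d.getD key 0 + 1))
      PySem.Dict.empty
  let scores : List Int := patterns.map (fun p =>
    (PySem.List.pyRange 0 40).foldl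
      (fun acc r => acc + tally.getD (r, PySem.List.pyGetD p (PySem.Int.mod r (p.length : Int)) 0) 0) 0)
  let m : Int := (PySem.List.max? scores id).getD 0
  (PySem.List.enumerate scores).foldl
    (fun acc ks => if ks.2 = m then acc ++ [ks.1 + 1] else acc) []

-- ===== PRECONDITION & SPEC =====
def Spec_solution (answers : List Int) (out : List Int) : Prop := out = solution_alt answers
instance (answers : List Int) (out : List Int) : Decidable (Spec_solution answers out) := by unfold Spec_solution; infer_instance

-- ===== CLAIM (what is proved, stated in full; the proofs are below) =====
def Claim_equal_solution : Prop := ∀ (answers : List Int), Dom_solution answers → Spec_solution answers (solution answers)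

-- ===== LEMMAS AND PROOFS =====

-- proof-only middle form: the per-pattern match count as a single scan over enumerate(answers)
def pvDirect (answers p : List Int) : Int :=
  (PySem.List.enumerate answers).foldl
    (fun acc ia => if ia.2 = PySem.List.pyGetD p (PySem.Int.mod ia.1 (p.length : Int)) 0 then acc + 1 else acc) 0

-- an entry (i, v) of enumerate xs s has s ≤ i < s + |xs| and v = xs[i - s]
theorem pv_mem_enumerate (xs : List Int) (s : Int) :
    ∀ q ∈ PySem.List.enumerate xs s,
      s ≤ q.1 ∧ q.1 < s + xs.length ∧ PySem.List.pyGetD xs (q.1 - s) 0 = q.2 := by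
  induction xs generalizing s with
  | nil => intro q hq; simp [PySem.List.enumerate] at hq
  | cons x t ih =>
      intro q hq
      rw [PySem.List.enumerate_cons, List.mem_cons] at hq
      rcases hq with hq | hq
      · subst hq
        refine ⟨le_refl s, by simp, ?_⟩
        simp [PySem.List.pyGetD, PySem.List.pyGet?, PySem.List.pyIdx?]
      · obtain ⟨h1, h2, h3⟩ := ih (s + 1) q hq
        have hlt : q.1 < s + ((x :: t).length : Int) := by simp at h2 ⊢; omega
        refine ⟨by omega, hlt, ?_⟩
        have hb : q.1 - (s + 1) < (t.length : Int) := by omega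
        rw [PySem.List.pyGetD_eq_getElem t 0 (by omega) hb] at h3
        rw [PySem.List.pyGetD_eq_getElem (x :: t) 0 (by omega) (by simp; omega)]
        have hn : (q.1 - s).toNat = (q.1 - (s + 1)).toNat + 1 := by omega
        rw [← h3]
        simp [hn]

-- A's per-pattern count over the index range equals the middle form pvDirect
theorem pv_count_eq (answers p : List Int) (m : Int) (hm : m = (p.length : Int)) :
    (PySem.List.pyRange 0 answers.length).foldl
      (fun acc i => if PySem.List.pyGetD answers i 0 = PySem.List.pyGetD p (PySem.Int.mod i m) 0 then acc + 1 else acc) 0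
    = pvDirect answers p := by
  subst hm
  unfold pvDirect
  have hmap := PySem.List.map_fst_enumerate answers 0
  rw [zero_add] at hmap
  rw [← hmap, List.foldl_map]
  refine PySem.List.foldl_congr_mem _ _ _ _ ?_
  intro acc q hq
  have h := (pv_mem_enumerate answers 0 q hq).2.2
  rw [sub_zero] at h
  rw [h]

-- one interleaved triple-counter pass = three independent passes
theorem pv_triple (l : List Int) (f g h : Int → Int → Int) (a b c : Int) :
    List.foldl (fun (s : Int × Int × Int) i => (f s.1 i, g s.2.1 i, h s.2.2 i)) (a, b, c) l
    = (List.foldl f a l, List.foldl g b l, List.foldl h c l) := by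
  induction l generalizing a b c with
  | nil => rfl
  | cons x t ih => simp only [List.foldl_cons]; exact ih _ _ _

-- residues mod 40 and then mod a divisor of 40 = residues mod that divisor
theorem pv_mod40 (i m : Int) (hm : 0 < m) (hd : m ∣ 40) :
    PySem.Int.mod (PySem.Int.mod i 40) m = PySem.Int.mod i m := by
  rw [PySem.Int.mod_eq_emod_of_pos (by norm_num : (0:Int) < 40),
      PySem.Int.mod_eq_emod_of_pos hm, PySem.Int.mod_eq_emod_of_pos hm]
  exact Int.emod_emod_of_dvd i hd

-- summing the indicator of q over r ∈ range(40) picks out r = q.1 once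
theorem pv_sum_indicator (v : Int → Int) (q : Int × Int) (h0 : 0 ≤ q.1) (h40 : q.1 < 40) :
    ((PySem.List.pyRange 0 40).map
        (fun r => if q = ((r, v r) : Int × Int) then (1 : Int) else 0)).sum
    = if q.2 = v q.1 then 1 else 0 := by
  rw [PySem.List.pyRange_one_append 0 q.1 40 h0 (by omega),
      PySem.List.pyRange_one_cons h40, List.map_append, List.sum_append, List.map_cons,
      List.sum_cons]
  have hL : ((PySem.List.pyRange 0 q.1).map
      (fun r => if q = ((r, v r) : Int × Int) then (1 : Int) else 0)).sum = 0 := by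
    apply List.sum_eq_zero
    intro x hx
    obtain ⟨r, hr, hx⟩ := List.mem_map.1 hx
    have := (PySem.List.mem_pyRange_one).1 hr
    have hne : q ≠ ((r, v r) : Int × Int) := by
      intro h; apply absurd (congrArg Prod.fst h); simp; omega
    simpa [hne] using hx.symm
  have hR : ((PySem.List.pyRange (q.1 + 1) 40).map
      (fun r => if q = ((r, v r) : Int × Int) then (1 : Int) else 0)).sum = 0 := by
    apply List.sum_eq_zero
    intro x hx
    obtain ⟨r, hr, hx⟩ := List.mem_map.1 hx
    have := (PySem.List.mem_pyRange_one).1 hr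
    have hne : q ≠ ((r, v r) : Int × Int) := by
      intro h; apply absurd (congrArg Prod.fst h); simp; omega
    simpa [hne] using hx.symm
  rw [hL, hR]
  by_cases h : q.2 = v q.1
  · have he : q = ((q.1, v q.1) : Int × Int) := by
      rw [← h]
    simp [← he, h]
  · have he : q ≠ ((q.1, v q.1) : Int × Int) := by
      intro he; apply h; rw [he]
    simp [he, h]

-- summing each key's multiplicity over r ∈ range(40) = one counting scan over the keys
theorem pv_sum_counts (v : Int → Int) (L : List (Int × Int))
    (hL : ∀ q ∈ L, 0 ≤ q.1 ∧ q.1 < 40) (a : Int) :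
    L.foldl (fun acc q => if q.2 = v q.1 then acc + 1 else acc) a
    = a + ((PySem.List.pyRange 0 40).map (fun r => ((L.count ((r, v r) : Int × Int) : Int)))).sum := by
  induction L generalizing a with
  | nil => simp
  | cons q t ih =>
      obtain ⟨h0, h40⟩ := hL q (List.mem_cons_self ..)
      have hrest : ∀ p ∈ t, 0 ≤ p.1 ∧ p.1 < 40 := fun p hp => hL p (List.mem_cons_of_mem _ hp)
      have hcnt : ((PySem.List.pyRange 0 40).map
          (fun r => ((List.count ((r, v r) : Int × Int) (q :: t) : Int)))).sum
          = ((PySem.List.pyRange 0 40).map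
              (fun r => ((List.count ((r, v r) : Int × Int) t : Int)))).sum
            + (if q.2 = v q.1 then 1 else 0) := by
        have : ((PySem.List.pyRange 0 40).map
            (fun r => ((List.count ((r, v r) : Int × Int) (q :: t) : Int)))).sum
            = ((PySem.List.pyRange 0 40).map
                (fun r => ((List.count ((r, v r) : Int × Int) t : Int))
                  + (if q = ((r, v r) : Int × Int) then (1 : Int) else 0))).sum := by
          congr 1
          apply List.map_congr_left
          intro r _
          simp only [List.count_cons, beq_iff_eq]
          push_cast
          rfl
        rw [this, PySem.List.sum_map_add_int, pv_sum_indicator v q h0 h40]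
      rw [List.foldl_cons, ih hrest, hcnt]
      split_ifs <;> ring

-- B's tally-based score for a pattern equals the middle form pvDirect
theorem pv_tally_eq (answers p : List Int) (hm : 0 < (p.length : Int))
    (hd : (p.length : Int) ∣ 40) :
    (PySem.List.pyRange 0 40).foldl
      (fun acc r => acc +
        (((PySem.List.enumerate answers).foldl
            (fun d ia =>
              let key : Int × Int := (PySem.Int.mod ia.1 40, ia.2)
              d.insert key (d.getD key 0 + 1))
            PySem.Dict.empty).getD
          (r, PySem.List.pyGetD p (PySem.Int.mod r (p.length : Int)) 0) 0)) 0
    = pvDirect answers p := by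
  have hkeys : (PySem.List.enumerate answers).foldl
      (fun d ia =>
        let key : Int × Int := (PySem.Int.mod ia.1 40, ia.2)
        d.insert key (d.getD key 0 + 1))
      PySem.Dict.empty
      = PySem.Dict.counter
          ((PySem.List.enumerate answers).map (fun ia => ((PySem.Int.mod ia.1 40, ia.2) : Int × Int))) := by
    rw [← PySem.Dict.foldl_insert_getD_add_one_eq_counter, List.foldl_map]
  rw [hkeys]
  simp only [PySem.Dict.getD_counter]
  rw [PySem.List.foldl_add]
  rw [← pv_sum_counts (fun r => PySem.List.pyGetD p (PySem.Int.mod r (p.length : Int)) 0)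
        ((PySem.List.enumerate answers).map (fun ia => ((PySem.Int.mod ia.1 40, ia.2) : Int × Int)))
        (by
          intro q hq
          obtain ⟨ia, _, hia⟩ := List.mem_map.1 hq
          subst hia
          exact ⟨PySem.Int.mod_nonneg _ (by norm_num), PySem.Int.mod_lt _ (by norm_num)⟩) 0]
  rw [List.foldl_map]
  unfold pvDirect
  congr 1
  funext acc ia
  show (if ia.2 = PySem.List.pyGetD p (PySem.Int.mod (PySem.Int.mod ia.1 40) (p.length : Int)) 0 then acc + 1 else acc)
      = (if ia.2 = PySem.List.pyGetD p (PySem.Int.mod ia.1 (p.length : Int)) 0 then acc + 1 else acc)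
  rw [pv_mod40 ia.1 (p.length : Int) hm hd]

-- Python's max(list of three ints) has the value max x1 (max x2 x3)
theorem pv_maxq (x1 x2 x3 : Int) :
    (PySem.List.max? [x1, x2, x3] id).getD 0 = max x1 (max x2 x3) := by
  by_cases h12 : x1 < x2 <;> by_cases h23 : x2 < x3 <;> by_cases h13 : x1 < x3 <;>
    simp [PySem.List.max?, h12, h23, h13] <;> omega

-- ===== VERDICT (by name: the statement is the Claim_ definition above) =====
set_option maxHeartbeats 1000000 in
theorem solution_spec : Claim_equal_solution := by
  intro answers _
  unfold Spec_solution
  simp only [solution, solution_alt, List.map_cons, List.map_nil]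
  rw [pv_triple (PySem.List.pyRange 0 answers.length)
      (fun acc i => if PySem.List.pyGetD answers i 0 = PySem.List.pyGetD [1, 2, 3, 4, 5] (PySem.Int.mod i 5) 0 then acc + 1 else acc)
      (fun acc i => if PySem.List.pyGetD answers i 0 = PySem.List.pyGetD [2, 1, 2, 3, 2, 4, 2, 5] (PySem.Int.mod i 8) 0 then acc + 1 else acc)
      (fun acc i => if PySem.List.pyGetD answers i 0 = PySem.List.pyGetD [3, 3, 1, 1, 2, 2, 4, 4, 5, 5] (PySem.Int.mod i 10) 0 then acc + 1 else acc)
      0 0 0]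
  rw [pv_count_eq answers [1, 2, 3, 4, 5] 5 (by norm_num),
      pv_count_eq answers [2, 1, 2, 3, 2, 4, 2, 5] 8 (by norm_num),
      pv_count_eq answers [3, 3, 1, 1, 2, 2, 4, 4, 5, 5] 10 (by norm_num)]
  simp only [pv_tally_eq answers [1, 2, 3, 4, 5] (by norm_num) (by norm_num),
      pv_tally_eq answers [2, 1, 2, 3, 2, 4, 2, 5] (by norm_num) (by norm_num),
      pv_tally_eq answers [3, 3, 1, 1, 2, 2, 4, 4, 5, 5] (by norm_num) (by norm_num)]
  simp only [pv_maxq, PySem.List.enumerate_cons, PySem.List.enumerate_nil,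
    List.foldl_cons, List.foldl_nil]
  norm_num
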